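-- pv_equiv track=rewrite | github.com/TMarcher74/WhatsappWrapV2 | backend/Text_Processing/analyser.py | get_user_reply_map
-- ===== SOURCE A (Python) =====
-- from collections import Counter, defaultdict
--
-- def get_user_reply_map(users_wrt_messages: list[str]) -> dict[str, dict[str, int]]:
--     reply_map = defaultdict(lambda: defaultdict(int))
--
--     for i in range(1, len(users_wrt_messages)):
--         prev_user = users_wrt_messages[i - 1]
--         cur_user = users_wrt_messages[i]
--         if prev_user != cur_user:
--             # Avoid elf replies
--             reply_map[cur_user][prev_user] += 1
--
--     return {user: dict(replies) for user, replies in reply_map.items()}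
-- ===== SOURCE B (Python) =====
-- def get_user_reply_map(users_wrt_messages: list[str]) -> dict[str, dict[str, int]]:
--     pairs = list(zip(users_wrt_messages, users_wrt_messages[1:]))
--     # Pass 1: the repliers, in order of their first reply.
--     repliers = []
--     for prev, cur in pairs:
--         if prev != cur and cur not in repliers:
--             repliers.append(cur)
--     # Pass 2: for each replier, tally whom they replied to by rescanning the pairs.
--     result = {}
--     for cur in repliers:
--         tallies = {}
--         for prev, c in pairs:
--             if c == cur and prev != c:
--                 tallies[prev] = tallies.get(prev, 0) + 1
--         result[cur] = tallies
--     return result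
-- ===== Notes on version B (the rewrite author's own statement) =====
-- stated objective: alternative
-- what changed: A makes a single indexed pass incrementing a nested defaultdict-of-defaultdicts; B is a staged algorithm: pass 1 collects the list of repliers in order of first reply, then for each replier it rescans the zipped pair list to tally whom they replied to, assembling the result per replier.
import Mathlib
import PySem

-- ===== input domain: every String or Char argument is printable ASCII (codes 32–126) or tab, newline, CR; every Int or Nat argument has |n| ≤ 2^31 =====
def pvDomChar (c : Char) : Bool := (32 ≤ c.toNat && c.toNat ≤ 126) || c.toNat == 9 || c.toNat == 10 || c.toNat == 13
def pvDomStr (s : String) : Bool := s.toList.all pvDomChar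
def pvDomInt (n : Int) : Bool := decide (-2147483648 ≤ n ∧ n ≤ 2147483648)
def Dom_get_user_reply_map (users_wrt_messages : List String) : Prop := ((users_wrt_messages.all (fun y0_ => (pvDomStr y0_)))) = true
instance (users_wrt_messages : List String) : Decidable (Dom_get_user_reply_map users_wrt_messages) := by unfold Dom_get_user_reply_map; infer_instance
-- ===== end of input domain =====

-- B replaces A's single indexed pass over a nested defaultdict by two staged passes:
-- first collect the repliers in order of first reply, then for each replier rescan the
-- adjacent pairs to tally whom they replied to (objective: alternative staged algorithm).


-- ===== PORT A =====
-- reply_map is a defaultdict of defaultdicts: accessing reply_map[cur_user] creates the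
-- inner dict in place, and the `+= 1` on the inner key is Dict.modify with default 0.
def get_user_reply_map (users_wrt_messages : List String) : List (String × List (String × Int)) :=
  let reply_map : PySem.Dict String (PySem.Dict String Int) :=
    (PySem.List.pyRange 1 (users_wrt_messages.length : Int)).foldl
      (fun d i =>
        let prev_user := PySem.List.pyGetD users_wrt_messages (i - 1) ""
        let cur_user := PySem.List.pyGetD users_wrt_messages i ""
        if prev_user ≠ cur_user then
          d.insert cur_user ((d.getD cur_user PySem.Dict.empty).modify prev_user 0 (· + 1))
        else d)
      PySem.Dict.empty
  -- {user: dict(replies) for user, replies in reply_map.items()}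
  reply_map.items.map (fun p => (p.1, p.2.items))

-- ===== PORT B =====
def get_user_reply_map_alt (users_wrt_messages : List String) : List (String × List (String × Int)) :=
  -- pairs = list(zip(users_wrt_messages, users_wrt_messages[1:]))
  let pairs := users_wrt_messages.zip (users_wrt_messages.drop 1)
  -- pass 1: repliers, in order of their first reply
  let repliers : List String :=
    pairs.foldl (fun rs q => if q.1 ≠ q.2 ∧ q.2 ∉ rs then rs ++ [q.2] else rs) []
  -- pass 2: for each replier, rescan the pairs and tally
  let result : PySem.Dict String (PySem.Dict String Int) :=
    repliers.foldl
      (fun r cur =>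
        let tallies : PySem.Dict String Int :=
          pairs.foldl
            (fun t q => if q.2 = cur ∧ q.1 ≠ q.2 then t.insert q.1 (t.getD q.1 0 + 1) else t)
            PySem.Dict.empty
        r.insert cur tallies)
      PySem.Dict.empty
  result.items.map (fun p => (p.1, p.2.items))

-- ===== PRECONDITION & SPEC =====
def Spec_get_user_reply_map (users_wrt_messages : List String) (out : List (String × List (String × Int))) : Prop := out = get_user_reply_map_alt users_wrt_messages
instance (users_wrt_messages : List String) (out : List (String × List (String × Int))) : Decidable (Spec_get_user_reply_map users_wrt_messages out) := by unfold Spec_get_user_reply_map; infer_instance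

-- ===== CLAIM (what is proved, stated in full; the proofs are below) =====
def Claim_equal_get_user_reply_map : Prop := ∀ (users_wrt_messages : List String), Dom_get_user_reply_map users_wrt_messages → Spec_get_user_reply_map users_wrt_messages (get_user_reply_map users_wrt_messages)

-- ===== LEMMAS AND PROOFS =====

-- the adjacent distinct (prev, cur) pairs both programs count
def pvP (us : List String) : List (String × String) :=
  (us.zip (us.drop 1)).filter (fun q => q.1 ≠ q.2)

-- A's loop body on one (prev, cur) pair
def pvNAdd (d : PySem.Dict String (PySem.Dict String Int)) (q : String × String) :
    PySem.Dict String (PySem.Dict String Int) :=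
  d.insert q.2 ((d.getD q.2 PySem.Dict.empty).modify q.1 0 (· + 1))

theorem pvFoldP_items (P : List (String × String)) :
    (P.foldl pvNAdd PySem.Dict.empty).items
      = (PySem.Set.ofList (P.map (·.2))).map
          (fun c => (c, PySem.Dict.counter ((P.filter (fun q => q.2 == c)).map (·.1)))) := by
  induction P using List.reverseRecOn with
  | nil => rfl
  | append_singleton P q ih =>
    rw [List.foldl_append, List.foldl_cons, List.foldl_nil]
    have hkeys : (P.foldl pvNAdd PySem.Dict.empty).keys
        = PySem.Set.ofList (P.map (fun x => x.2)) := by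
      show (P.foldl pvNAdd PySem.Dict.empty).items.map (fun x => x.1)
          = PySem.Set.ofList (P.map (fun x => x.2))
      rw [ih, List.map_map]
      have hco : ((fun x : String × PySem.Dict String Int => x.1)
          ∘ (fun c => (c, PySem.Dict.counter ((P.filter (fun q => q.2 == c)).map (·.1)))))
          = fun c => c := rfl
      rw [hco, List.map_id']
    have hnd : (P.foldl pvNAdd PySem.Dict.empty).keys.Nodup := by
      rw [hkeys]; exact PySem.Set.nodup_ofList _
    have hmapq : (P ++ [q]).map (fun x => x.2) = P.map (fun x => x.2) ++ [q.2] := by simp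
    by_cases hm : q.2 ∈ PySem.Set.ofList (P.map (fun x => x.2))
    · have hc : (P.foldl pvNAdd PySem.Dict.empty).contains q.2 = true :=
        (PySem.Dict.contains_iff_mem_keys _ q.2).2 (hkeys ▸ hm)
      have hmemit : (q.2, PySem.Dict.counter ((P.filter (fun r => r.2 == q.2)).map (·.1)))
          ∈ (P.foldl pvNAdd PySem.Dict.empty).items := by
        rw [ih]
        exact List.mem_map_of_mem hm
      have hgetD := PySem.Dict.getD_of_mem_items _ hmemit hnd PySem.Dict.empty
      show (PySem.Dict.insert _ q.2 _).items = _
      rw [PySem.Dict.items_insert_of_contains _ _ hc, ih, List.map_map, hgetD, hmapq,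
        PySem.Set.ofList_append_singleton, PySem.Set.add_of_mem hm]
      apply List.map_congr_left
      intro c hcS
      show (if (c == q.2) = true then _ else _) = _
      by_cases hce : c = q.2
      · subst hce
        rw [if_pos (beq_self_eq_true _)]
        have hfq : (P ++ [q]).filter (fun r => r.2 == q.2) = P.filter (fun r => r.2 == q.2) ++ [q] := by
          rw [List.filter_append]
          simp
        rw [hfq, List.map_append,
          show List.map (fun x : String × String => x.1) [q] = [q.1] from rfl,
          PySem.Dict.counter_append_singleton]
      · have hbe : (c == q.2) = false := beq_eq_false_iff_ne.2 hce
        rw [hbe, if_neg Bool.false_ne_true]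
        have hfq : (P ++ [q]).filter (fun r => r.2 == c) = P.filter (fun r => r.2 == c) := by
          rw [List.filter_append]
          have hb2 : (q.2 == c) = false := beq_eq_false_iff_ne.2 (fun he => hce he.symm)
          simp [hb2]
        rw [hfq]
    · have hc : (P.foldl pvNAdd PySem.Dict.empty).contains q.2 = false := by
        cases hb : (P.foldl pvNAdd PySem.Dict.empty).contains q.2 with
        | false => rfl
        | true => exact absurd (hkeys ▸ (PySem.Dict.contains_iff_mem_keys _ q.2).1 hb) hm
      have hgetD := PySem.Dict.getD_of_not_contains (P.foldl pvNAdd PySem.Dict.empty)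
        (PySem.Dict.empty : PySem.Dict String Int) hc
      show (PySem.Dict.insert _ q.2 _).items = _
      rw [PySem.Dict.items_insert_of_not_contains _ _ hc, ih, hgetD, hmapq,
        PySem.Set.ofList_append_singleton, PySem.Set.add_of_not_mem hm, List.map_append]
      congr 1
      · apply List.map_congr_left
        intro c hcS
        have hce : q.2 ≠ c := fun he => hm (he ▸ hcS)
        have hfq : (P ++ [q]).filter (fun r => r.2 == c) = P.filter (fun r => r.2 == c) := by
          rw [List.filter_append]
          have hb2 : (q.2 == c) = false := beq_eq_false_iff_ne.2 hce
          simp [hb2]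
        rw [hfq]
      · have hfP : P.filter (fun r => r.2 == q.2) = [] := by
          rw [List.filter_eq_nil_iff]
          intro r hr hb
          exact hm ((PySem.Set.mem_ofList _ _).2 (eq_of_beq hb ▸ List.mem_map_of_mem hr))
        have hfq : (P ++ [q]).filter (fun r => r.2 == q.2) = [q] := by
          rw [List.filter_append, hfP]
          simp
        simp only [List.map_cons, List.map_nil]
        rw [hfq]
        rw [show [q].map (fun x : String × String => x.1) = [] ++ [q.1] from rfl,
          PySem.Dict.counter_append_singleton]
        rfl

theorem pvA_eq_foldP (us : List String) :
    get_user_reply_map us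
      = ((pvP us).foldl pvNAdd PySem.Dict.empty).items.map (fun p => (p.1, p.2.items)) := by
  have hloop : (PySem.List.pyRange 1 (us.length : Int)).foldl
      (fun d i =>
        if PySem.List.pyGetD us (i - 1) "" ≠ PySem.List.pyGetD us i "" then
          d.insert (PySem.List.pyGetD us i "")
            ((d.getD (PySem.List.pyGetD us i "") PySem.Dict.empty).modify
              (PySem.List.pyGetD us (i - 1) "") 0 (· + 1))
        else d)
      PySem.Dict.empty
      = (pvP us).foldl pvNAdd PySem.Dict.empty := by
    cases us with
    | nil => rfl
    | cons x t =>
      have hzlen : ((x :: t).zip t).length = t.length := by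
        simp [List.length_zip]
      have hF : ∀ (d : PySem.Dict String (PySem.Dict String Int)) (j : Int),
          j ∈ PySem.List.pyRange 1 (((x :: t).length : Nat) : Int) →
          (if PySem.List.pyGetD (x :: t) (j - 1) "" ≠ PySem.List.pyGetD (x :: t) j "" then
            d.insert (PySem.List.pyGetD (x :: t) j "")
              ((d.getD (PySem.List.pyGetD (x :: t) j "") PySem.Dict.empty).modify
                (PySem.List.pyGetD (x :: t) (j - 1) "") 0 (· + 1))
          else d)
          = (fun (d : PySem.Dict String (PySem.Dict String Int)) (q : String × String) =>
              if decide (q.1 ≠ q.2) = true then pvNAdd d q else d) d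
              (PySem.List.pyGetD (("", "") :: (x :: t).zip t) j ("", "")) := by
        intro d j hj
        rcases PySem.List.mem_pyRange_one.1 hj with ⟨h1, h2⟩
        have hnlen : (((x :: t).length : Nat) : Int) = (t.length : Int) + 1 := by
          simp [List.length_cons]
        have hk : j = ((j.toNat : Nat) : Int) := (Int.toNat_of_nonneg (by omega)).symm
        obtain ⟨k', hk'⟩ : ∃ k', j.toNat = k' + 1 := ⟨j.toNat - 1, by omega⟩
        have hkn : k' + 1 < t.length + 1 := by omega
        have hz : PySem.List.pyGetD (("", "") :: (x :: t).zip t) j ("", "")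
            = (PySem.List.pyGetD (x :: t) (j - 1) "", PySem.List.pyGetD (x :: t) j "") := by
          rw [hk, hk']
          have hj1 : (((k' + 1 : Nat) : Nat) : Int) - 1 = ((k' : Nat) : Int) := by omega
          rw [hj1, PySem.List.pyGetD_natCast, PySem.List.pyGetD_natCast,
            PySem.List.pyGetD_natCast]
          have hlt : k' < ((x :: t).zip t).length := by omega
          have hltt : k' < t.length := by omega
          have hltx : k' + 1 < (x :: t).length := by
            simp only [List.length_cons]
            omega
          have hltx' : k' < (x :: t).length := by
            simp only [List.length_cons]
            omega
          rw [List.getD_cons_succ, List.getD_eq_getElem?_getD, List.getElem?_eq_getElem hlt,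
            List.getD_eq_getElem?_getD, List.getElem?_eq_getElem hltx',
            List.getD_eq_getElem?_getD, List.getElem?_eq_getElem hltx]
          rw [List.getElem_zip]
          have ht : t[k']'hltt = (x :: t)[k' + 1]'hltx := (List.getElem_cons_succ ..).symm
          rw [ht]
          rfl
        rw [hz]
        simp only [decide_eq_true_eq]
        by_cases hpc : PySem.List.pyGetD (x :: t) (j - 1) "" ≠ PySem.List.pyGetD (x :: t) j ""
        · rw [if_pos hpc, if_pos hpc]
          rfl
        · rw [if_neg hpc, if_neg hpc]
      refine (PySem.List.foldl_congr_mem _ _ _ _ hF).trans ?_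
      have hlen : (((x :: t).length : Nat) : Int) = PySem.List.len (("", "") :: (x :: t).zip t) := by
        simp [PySem.List.len, List.length_cons, hzlen]
      rw [hlen]
      refine (PySem.List.foldl_pyRange_pyGetD (("", "") :: (x :: t).zip t) ("", "")
        (fun (d : PySem.Dict String (PySem.Dict String Int)) (q : String × String) =>
          if decide (q.1 ≠ q.2) = true then pvNAdd d q else d)
        PySem.Dict.empty (by omega : (0:Int) ≤ 1)).trans ?_
      unfold pvP
      rw [List.foldl_filter]
      rfl
  unfold get_user_reply_map
  exact congrArg (fun m : PySem.Dict String (PySem.Dict String Int) =>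
    m.items.map (fun p => (p.1, p.2.items))) hloop

-- B's pass 1 builds exactly set-of-first-occurrences of the curs of the distinct pairs
theorem pvRepliers_eq (l : List (String × String)) (rs : List String) :
    l.foldl (fun rs q => if q.1 ≠ q.2 ∧ q.2 ∉ rs then rs ++ [q.2] else rs) rs
      = PySem.Set.update rs ((l.filter (fun q => q.1 ≠ q.2)).map (·.2)) := by
  induction l generalizing rs with
  | nil => rfl
  | cons q t ih =>
    rw [List.foldl_cons, List.filter_cons]
    by_cases hne : q.1 ≠ q.2
    · have hd : (decide (q.1 ≠ q.2)) = true := decide_eq_true hne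
      rw [if_pos hd, List.map_cons]
      by_cases hm : q.2 ∈ rs
      · rw [if_neg (by intro hcon; exact hcon.2 hm), ih]
        show _ = PySem.Set.update (PySem.Set.add rs q.2) _
        rw [PySem.Set.add_of_mem hm]
      · rw [if_pos ⟨hne, hm⟩, ih]
        show _ = PySem.Set.update (PySem.Set.add rs q.2) _
        rw [PySem.Set.add_of_not_mem hm]
    · have hd : (decide (q.1 ≠ q.2)) = false := decide_eq_false hne
      rw [if_neg (by intro hcon; exact hne hcon.1), if_neg (by simp [hd]), ih]

-- B's pass-2 inner tally scan is Counter of the prevs aimed at cur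
theorem pvTallies_eq (us : List String) (cur : String) :
    (us.zip (us.drop 1)).foldl
        (fun t q => if q.2 = cur ∧ q.1 ≠ q.2 then t.insert q.1 (t.getD q.1 0 + 1) else t)
        PySem.Dict.empty
      = PySem.Dict.counter (((pvP us).filter (fun q => q.2 == cur)).map (·.1)) := by
  rw [← PySem.Dict.foldl_insert_getD_add_one_eq_counter]
  unfold pvP
  rw [List.foldl_map, List.foldl_filter, List.foldl_filter]
  refine (PySem.List.foldl_congr_mem _ _ _ _ ?_).symm
  intro t q _
  by_cases h1 : q.2 = cur <;> by_cases h2 : q.1 ≠ q.2 <;>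
    simp [h1, h2]

theorem pvAB_eq (us : List String) :
    get_user_reply_map us = get_user_reply_map_alt us := by
  rw [pvA_eq_foldP, pvFoldP_items]
  have hB : get_user_reply_map_alt us = (((us.zip (us.drop 1)).foldl
      (fun rs q => if q.1 ≠ q.2 ∧ q.2 ∉ rs then rs ++ [q.2] else rs) []).foldl
      (fun r cur => r.insert cur
        ((us.zip (us.drop 1)).foldl
          (fun t q => if q.2 = cur ∧ q.1 ≠ q.2 then t.insert q.1 (t.getD q.1 0 + 1) else t)
          PySem.Dict.empty)) PySem.Dict.empty).items.map (fun p => (p.1, p.2.items)) := rfl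
  rw [hB]
  have hrep : (us.zip (us.drop 1)).foldl
      (fun rs q => if q.1 ≠ q.2 ∧ q.2 ∉ rs then rs ++ [q.2] else rs) []
      = PySem.Set.ofList ((pvP us).map (·.2)) := by
    rw [pvRepliers_eq]
    rfl
  rw [hrep]
  have hfresh : ∀ a ∈ PySem.Set.ofList ((pvP us).map (·.2)),
      (PySem.Dict.empty : PySem.Dict String (PySem.Dict String Int)).contains a = false :=
    fun a _ => PySem.Dict.contains_empty a
  have hndk : ((PySem.Set.ofList ((pvP us).map (·.2))).map (fun c => c)).Nodup := by
    rw [List.map_id']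
    exact PySem.Set.nodup_ofList _
  rw [PySem.Dict.items_foldl_insert_fresh _ _ _ _ hfresh hndk]
  rw [show (PySem.Dict.empty : PySem.Dict String (PySem.Dict String Int)).items = [] from rfl,
    List.nil_append, List.map_map, List.map_map]
  apply List.map_congr_left
  intro c hcS
  show (c, (PySem.Dict.counter (((pvP us).filter (fun q => q.2 == c)).map (·.1))).items)
      = (c, ((us.zip (us.drop 1)).foldl
          (fun t q => if q.2 = c ∧ q.1 ≠ q.2 then t.insert q.1 (t.getD q.1 0 + 1) else t)
          PySem.Dict.empty).items)
  rw [pvTallies_eq us c]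

-- ===== VERDICT (by name: the statement is the Claim_ definition above) =====
theorem get_user_reply_map_spec : Claim_equal_get_user_reply_map := by
  intro us _
  show get_user_reply_map us = get_user_reply_map_alt us
  exact pvAB_eq us
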